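-- pv_equiv track=rewrite | github.com/jgyy/python-practice | projects/min_span_tree.py | find_minimum_edge
-- ===== SOURCE A (Python) =====
-- def find_minimum_edge(a_graph, visited_nodes):
--     """Given a graph a list of nodes, find the edge
--     with the minimum weight regarding the list and does not
--     form a cycle"""
--     minimum_distance = 1000
--     minimum_edge = None
--     for node in visited_nodes:
--         for edge in a_graph:
--             # Check both nodes of the edge, since edges are two way.
--             if node == edge[0]:
--                 if a_graph[edge] <= minimum_distance:
--                     if edge[1] not in visited_nodes:
--                         minimum_distance = a_graph[edge]
--                         minimum_edge = edge
--             elif node == edge[1]: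
--                 if a_graph[edge] <= minimum_distance:
--                     if edge[0] not in visited_nodes:
--                         minimum_distance = a_graph[edge]
--                         minimum_edge = edge
--             else:
--                 pass
--     return minimum_edge
-- ===== SOURCE B (Python) =====
-- def find_minimum_edge(a_graph, visited_nodes):
--     """Adjacency-indexed version: index the edges by endpoint once, then for
--     each visited node scan only its incident edges (set membership for the
--     cycle check), keeping the lowest acceptable weight seen so far.
--     Weights above 1000 are never accepted (the module's sentinel bound)."""
--     adj = {}
--     for (u, v), w in a_graph.items():
--         adj.setdefault(u, []).append((u, v, w))
--         if v != u:
--             adj.setdefault(v, []).append((u, v, w))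
--     visited = set(visited_nodes)
--     best_w = 1000
--     best = None
--     for node in visited_nodes:
--         for u, v, w in adj.get(node, ()):
--             other = v if node == u else u
--             if w <= best_w and other not in visited:
--                 best_w = w
--                 best = (u, v)
--     return best
-- ===== Notes on version B (the rewrite author's own statement) =====
-- stated objective: faster
-- what changed: Replaces A's per-visited-node scan of the whole edge dict (with dict weight lookups and list-membership cycle checks) by an adjacency index built once plus a membership set, so each visited node only scans its incident edges.
import Mathlib
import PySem

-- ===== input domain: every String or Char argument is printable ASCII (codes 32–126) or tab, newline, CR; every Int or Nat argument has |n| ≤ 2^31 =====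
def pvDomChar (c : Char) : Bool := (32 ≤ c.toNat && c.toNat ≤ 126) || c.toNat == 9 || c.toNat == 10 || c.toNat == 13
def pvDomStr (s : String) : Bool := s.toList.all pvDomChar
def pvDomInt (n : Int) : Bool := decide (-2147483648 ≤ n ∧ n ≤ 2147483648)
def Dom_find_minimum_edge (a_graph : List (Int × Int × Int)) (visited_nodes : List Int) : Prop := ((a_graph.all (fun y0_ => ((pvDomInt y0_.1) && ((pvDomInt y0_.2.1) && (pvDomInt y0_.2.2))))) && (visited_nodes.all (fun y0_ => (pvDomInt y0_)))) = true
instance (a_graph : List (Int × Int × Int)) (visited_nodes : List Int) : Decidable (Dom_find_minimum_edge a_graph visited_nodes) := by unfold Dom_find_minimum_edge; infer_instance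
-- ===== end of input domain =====

-- B replaces A's per-node scan of ALL dict entries (dict weight lookups, list membership for
-- the cycle check) with an adjacency index built once plus a membership set, scanning only
-- the edges incident to each visited node.
-- a_graph is the Python dict {(u, v): w} as an association list: an entry (u, v, w) is key (u, v), value w.

-- ===== PORT A =====
-- the dict itself, for A's `a_graph[edge]` lookups
def findA_weights (a_graph : List (Int × Int × Int)) : PySem.Dict (Int × Int) Int :=
  PySem.Dict.mk (a_graph.map (fun e => ((e.1, e.2.1), e.2.2)))

-- inner loop body; `a_graph[edge]` is getD with default 0: the default is unreachable, the
-- iterated `edge` is always a key of the dict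
def findA_step (a_graph : List (Int × Int × Int)) (visited_nodes : List Int) (node : Int)
    (st : Int × Option (Int × Int)) (edge : Int × Int) : Int × Option (Int × Int) :=
  if node = edge.1 then
    if (findA_weights a_graph).getD edge 0 ≤ st.1 then
      if !(visited_nodes.contains edge.2) then ((findA_weights a_graph).getD edge 0, some edge) else st
    else st
  else if node = edge.2 then
    if (findA_weights a_graph).getD edge 0 ≤ st.1 then
      if !(visited_nodes.contains edge.1) then ((findA_weights a_graph).getD edge 0, some edge) else st
    else st
  else st

def find_minimum_edge (a_graph : List (Int × Int × Int)) (visited_nodes : List Int) : Option (Int × Int) :=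
  -- `for edge in a_graph` iterates the dict's keys (in insertion order)
  (visited_nodes.foldl
    (fun st node => (a_graph.map (fun e => (e.1, e.2.1))).foldl (findA_step a_graph visited_nodes node) st)
    (1000, none)).2

-- ===== PORT B =====
-- adjacency index: each edge filed under both of its (distinct) endpoints
-- (setdefault(p, []).append(e) is d[p] = d.get(p, []) + [e], i.e. Dict.modify)
def findB_adj (a_graph : List (Int × Int × Int)) : PySem.Dict Int (List (Int × Int × Int)) :=
  a_graph.foldl
    (fun d e =>
      let d1 := d.modify e.1 [] (· ++ [e])
      if e.2.1 ≠ e.1 then d1.modify e.2.1 [] (· ++ [e]) else d1)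
    PySem.Dict.empty

def findB_step (visited : PySem.Set Int) (node : Int)
    (st : Int × Option (Int × Int)) (e : Int × Int × Int) : Int × Option (Int × Int) :=
  let other := if node = e.1 then e.2.1 else e.1
  if e.2.2 ≤ st.1 ∧ visited.contains other = false then (e.2.2, some (e.1, e.2.1)) else st

def find_minimum_edge_alt (a_graph : List (Int × Int × Int)) (visited_nodes : List Int) : Option (Int × Int) :=
  let adj := findB_adj a_graph
  let visited := PySem.Set.ofList visited_nodes
  (visited_nodes.foldl
    (fun st node => (adj.getD node []).foldl (findB_step visited node) st)
    (1000, none)).2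

-- ===== PRECONDITION & SPEC =====
-- Pre_ excludes association lists with duplicate (u, v) keys, which do not represent any
-- Python dict input (a_graph is a dict; its keys are necessarily distinct).
def Pre_find_minimum_edge (a_graph : List (Int × Int × Int)) (visited_nodes : List Int) : Prop :=
  (a_graph.map (fun e => (e.1, e.2.1))).Nodup
instance (a_graph : List (Int × Int × Int)) (visited_nodes : List Int) : Decidable (Pre_find_minimum_edge a_graph visited_nodes) := by unfold Pre_find_minimum_edge; infer_instance

def pvWitness_find_minimum_edge : (List (Int × Int × Int)) × List Int := ([(1, 2, 5), (2, 3, 4)], [2])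

def Spec_find_minimum_edge (a_graph : List (Int × Int × Int)) (visited_nodes : List Int) (out : Option (Int × Int)) : Prop := out = find_minimum_edge_alt a_graph visited_nodes
instance (a_graph : List (Int × Int × Int)) (visited_nodes : List Int) (out : Option (Int × Int)) : Decidable (Spec_find_minimum_edge a_graph visited_nodes out) := by unfold Spec_find_minimum_edge; infer_instance

-- ===== CLAIM (what is proved, stated in full; the proofs are below) =====
def Claim_equal_find_minimum_edge : Prop := ∀ (a_graph : List (Int × Int × Int)) (visited_nodes : List Int), Dom_find_minimum_edge a_graph visited_nodes → Pre_find_minimum_edge a_graph visited_nodes → Spec_find_minimum_edge a_graph visited_nodes (find_minimum_edge a_graph visited_nodes)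

-- ===== LEMMAS AND PROOFS =====

-- A's inner-loop body with the dict lookup replaced by the entry's own weight
def stepA' (visited_nodes : List Int) (node : Int)
    (st : Int × Option (Int × Int)) (e : Int × Int × Int) : Int × Option (Int × Int) :=
  if node = e.1 then
    if e.2.2 ≤ st.1 then
      if !(visited_nodes.contains e.2.1) then (e.2.2, some (e.1, e.2.1)) else st
    else st
  else if node = e.2.1 then
    if e.2.2 ≤ st.1 then
      if !(visited_nodes.contains e.1) then (e.2.2, some (e.1, e.2.1)) else st
    else st
  else st

-- with distinct keys, A's dict lookup of an entry's key returns that entry's weight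
theorem weights_getD (a_graph : List (Int × Int × Int))
    (hnd : (a_graph.map (fun e => (e.1, e.2.1))).Nodup)
    (e : Int × Int × Int) (he : e ∈ a_graph) :
    (findA_weights a_graph).getD (e.1, e.2.1) 0 = e.2.2 := by
  apply PySem.Dict.getD_of_mem_items
  · show ((e.1, e.2.1), e.2.2) ∈ a_graph.map (fun e => ((e.1, e.2.1), e.2.2))
    exact List.mem_map.mpr ⟨e, he, rfl⟩
  · show ((a_graph.map (fun e => ((e.1, e.2.1), e.2.2))).map (·.1)).Nodup
    simpa [List.map_map, Function.comp] using hnd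

-- the adjacency index lists exactly the edges incident to a node, in input order
theorem adj_getD (a_graph : List (Int × Int × Int)) (n : Int) :
    (findB_adj a_graph).getD n [] =
      a_graph.filter (fun e => decide (n = e.1) || decide (n = e.2.1)) := by
  have aux : ∀ (g : List (Int × Int × Int)) (d : PySem.Dict Int (List (Int × Int × Int))),
      (g.foldl
        (fun d e =>
          let d1 := d.modify e.1 [] (· ++ [e])
          if e.2.1 ≠ e.1 then d1.modify e.2.1 [] (· ++ [e]) else d1) d).getD n [] =
        d.getD n [] ++ g.filter (fun e => decide (n = e.1) || decide (n = e.2.1)) := by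
    intro g
    induction g with
    | nil => simp
    | cons e t ih =>
      intro d
      rw [List.foldl_cons, ih, List.filter_cons]
      by_cases h1 : n = e.1 <;> by_cases h2 : n = e.2.1 <;> by_cases h3 : e.2.1 = e.1 <;>
        simp [h1, h2, h3, PySem.Dict.getD_modify] <;>
        first | omega | (rw [if_neg (fun h => h3 h.symm)]; simp)
  rw [findB_adj, aux]
  simp

-- the membership set answers exactly list membership
theorem set_contains (V : List Int) (x : Int) :
    (PySem.Set.ofList V).contains x = V.contains x := by
  by_cases h : x ∈ V <;> simp [PySem.Set.mem_ofList, h]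

-- one visited node's inner loop: A's scan of all dict keys equals B's scan of the node's
-- incident edges
theorem inner_eq (a_graph : List (Int × Int × Int)) (visited_nodes : List Int)
    (hnd : (a_graph.map (fun e => (e.1, e.2.1))).Nodup)
    (node : Int) (st : Int × Option (Int × Int)) :
    (a_graph.map (fun e => (e.1, e.2.1))).foldl (findA_step a_graph visited_nodes node) st =
      (((findB_adj a_graph).getD node []).foldl
        (findB_step (PySem.Set.ofList visited_nodes) node) st) := by
  rw [List.foldl_map]
  have h1 : a_graph.foldl (fun st e => findA_step a_graph visited_nodes node st (e.1, e.2.1)) st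
      = a_graph.foldl (stepA' visited_nodes node) st := by
    apply List.foldl_ext
    intro st' e he
    unfold findA_step stepA'
    rw [weights_getD a_graph hnd e he]
  rw [h1, adj_getD, List.foldl_filter]
  apply List.foldl_ext
  intro st' e _
  unfold stepA' findB_step
  simp only [set_contains]
  by_cases ha : node = e.1 <;> by_cases hb : node = e.2.1 <;>
    simp [ha, hb] <;> split_ifs <;> simp_all

-- ===== VERDICT (by name: the statement is the Claim_ definition above) =====
theorem find_minimum_edge_spec : Claim_equal_find_minimum_edge := by
  intro a_graph visited_nodes _ hpre
  unfold Spec_find_minimum_edge find_minimum_edge find_minimum_edge_alt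
  have h : ∀ st node,
      (a_graph.map (fun e => (e.1, e.2.1))).foldl (findA_step a_graph visited_nodes node) st =
        (((findB_adj a_graph).getD node []).foldl
          (findB_step (PySem.Set.ofList visited_nodes) node) st) :=
    fun st node => inner_eq a_graph visited_nodes hpre node st
  simp only [h]
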